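-- pv_equiv track=rewrite | github.com/anggiaureldewanti/Drink-Checker | menu-minuman/app.py | recommend_drinks
-- ===== SOURCE A (Python) =====
-- def recommend_drinks(data, preferences):
--     filtered_drinks = data
--     for attribute, value in preferences.items():
--         filtered_drinks = [drink for drink in filtered_drinks if drink[attribute] == value]
--
--     if not filtered_drinks:
--         return ["Tidak ada minuman yang cocok dengan preferensi Anda."]
--
--     recommendations = [drink['name'] for drink in filtered_drinks]
--     return recommendations
-- ===== SOURCE B (Python) =====
-- def recommend_drinks(data, preferences):
--     prefs = list(preferences.items())
--
--     def matches(drink, ps):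
--         if not ps:
--             return True
--         k, v = ps[0]
--         return drink[k] == v and matches(drink, ps[1:])
--
--     def collect(rest):
--         if not rest:
--             return []
--         drink = rest[0]
--         if matches(drink, prefs):
--             return [drink['name']] + collect(rest[1:])
--         return collect(rest[1:])
--
--     names = collect(data)
--     if not names:
--         return ["Tidak ada minuman yang cocok dengan preferensi Anda."]
--     return names
-- ===== Notes on version B (the rewrite author's own statement) =====
-- stated objective: alternative
-- what changed: Replaces A's p staged filtering passes (one intermediate list per preference) with a pair of recursive helpers: a recursion over the drinks that emits matching names directly, using a recursion over the preference list to test a drink.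
import Mathlib
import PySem

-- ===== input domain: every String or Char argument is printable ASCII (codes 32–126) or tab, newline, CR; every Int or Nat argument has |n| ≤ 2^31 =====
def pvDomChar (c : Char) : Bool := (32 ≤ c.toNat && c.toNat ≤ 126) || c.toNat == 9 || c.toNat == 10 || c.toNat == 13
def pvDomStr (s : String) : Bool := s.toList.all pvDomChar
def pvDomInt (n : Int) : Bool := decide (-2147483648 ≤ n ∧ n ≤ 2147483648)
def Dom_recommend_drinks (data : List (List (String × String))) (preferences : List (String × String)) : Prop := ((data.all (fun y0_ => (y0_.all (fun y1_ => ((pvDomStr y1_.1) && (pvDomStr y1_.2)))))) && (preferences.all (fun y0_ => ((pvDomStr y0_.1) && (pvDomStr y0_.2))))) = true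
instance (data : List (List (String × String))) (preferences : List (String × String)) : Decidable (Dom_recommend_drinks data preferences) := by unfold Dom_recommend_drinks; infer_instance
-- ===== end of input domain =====

-- B replaces A's staged per-preference filtering passes with a pair of recursive
-- helpers: one recursion over the drinks emitting matching names directly, one
-- recursion over the preferences testing a drink (objective: alternative).

-- ===== PORT A =====
-- dict lookup (assoc list, insertion order, first match)
def pvDGet? (d : List (String × String)) (k : String) : Option String :=
  match d with
  | [] => none
  | (k', v) :: rest => if k' == k then some v else pvDGet? rest k

def recommend_drinks (data : List (List (String × String))) (preferences : List (String × String)) : List String :=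
  let filtered_drinks :=
    preferences.foldl
      (fun fd (p : String × String) => fd.filter (fun drink => pvDGet? drink p.1 == some p.2))
      data
  if filtered_drinks = [] then
    ["Tidak ada minuman yang cocok dengan preferensi Anda."]
  else
    filtered_drinks.map (fun drink => (pvDGet? drink "name").getD "")

-- ===== PORT B =====
-- matches(drink, ps): head preference checked, then recurse on the tail
def pvMatches (drink : List (String × String)) : List (String × String) → Bool
  | [] => true
  | (k, v) :: ps => pvDGet? drink k == some v && pvMatches drink ps

-- collect(rest): recursion over the drinks, emitting the name of each match
def pvCollect (prefs : List (String × String)) : List (List (String × String)) → List String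
  | [] => []
  | drink :: rest =>
    if pvMatches drink prefs then
      (pvDGet? drink "name").getD "" :: pvCollect prefs rest
    else
      pvCollect prefs rest

def recommend_drinks_alt (data : List (List (String × String))) (preferences : List (String × String)) : List String :=
  match pvCollect preferences data with
  | [] => ["Tidak ada minuman yang cocok dengan preferensi Anda."]
  | names => names

-- ===== PRECONDITION & SPEC =====
-- Python raises KeyError exactly when a lookup A actually performs hits an absent key:
-- for each drink, the key of the first preference it fails to match must be present
-- (a value mismatch), and if it matches all preferences its 'name' key must be present.
def Pre_recommend_drinks (data : List (List (String × String))) (preferences : List (String × String)) : Prop :=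
  ∀ drink ∈ data,
    (let matched := preferences.takeWhile (fun p => drink.lookup p.1 == some p.2)
     if matched.length = preferences.length then "name" else (preferences.getD matched.length ("", "")).1)
      ∈ drink.map Prod.fst
instance (data : List (List (String × String))) (preferences : List (String × String)) : Decidable (Pre_recommend_drinks data preferences) := by unfold Pre_recommend_drinks; infer_instance

def pvWitness_recommend_drinks : (List (List (String × String))) × (List (String × String)) :=
  ([[("name", "Es Teh"), ("type", "cold")], [("name", "Kopi"), ("type", "hot")]], [("type", "cold")])

def Spec_recommend_drinks (data : List (List (String × String))) (preferences : List (String × String)) (out : List String) : Prop := out = recommend_drinks_alt data preferences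
instance (data : List (List (String × String))) (preferences : List (String × String)) (out : List String) : Decidable (Spec_recommend_drinks data preferences out) := by unfold Spec_recommend_drinks; infer_instance

-- ===== CLAIM (what is proved, stated in full; the proofs are below) =====
def Claim_equal_recommend_drinks : Prop := ∀ (data : List (List (String × String))) (preferences : List (String × String)), Dom_recommend_drinks data preferences → Pre_recommend_drinks data preferences → Spec_recommend_drinks data preferences (recommend_drinks data preferences)

-- ===== LEMMAS AND PROOFS =====
-- A's sequence of filters equals one filter by the conjunction of all predicates.
theorem foldl_filter_eq_filter_all {α β : Type} (f : β → α → Bool) :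
    ∀ (ps : List β) (xs : List α),
      ps.foldl (fun fd p => fd.filter (f p)) xs
        = xs.filter (fun x => ps.all (fun p => f p x)) := by
  intro ps
  induction ps with
  | nil => intro xs; simp
  | cons p rest ih =>
    intro xs
    simp only [List.foldl_cons, ih, List.filter_filter, List.all_cons]
    exact List.filter_congr (fun x _ => by rw [Bool.and_comm])

-- pvMatches is the conjunction of the per-preference tests.
theorem pvMatches_eq_all (drink : List (String × String)) :
    ∀ ps : List (String × String),
      pvMatches drink ps = ps.all (fun p => pvDGet? drink p.1 == some p.2) := by
  intro ps
  induction ps with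
  | nil => rfl
  | cons p rest ih => cases p; simp [pvMatches, ih]

-- B's recursive collector equals filter-then-map.
theorem pvCollect_eq (prefs : List (String × String)) :
    ∀ xs : List (List (String × String)),
      pvCollect prefs xs
        = (xs.filter (fun d => prefs.all (fun p => pvDGet? d p.1 == some p.2))).map
            (fun d => (pvDGet? d "name").getD "") := by
  intro xs
  induction xs with
  | nil => rfl
  | cons d rest ih =>
    simp only [pvCollect, pvMatches_eq_all, List.filter_cons]
    split_ifs with h <;> simp [ih]

-- ===== VERDICT (by name: the statement is the Claim_ definition above) =====
theorem recommend_drinks_spec : Claim_equal_recommend_drinks := by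
  intro data preferences _ _
  unfold Spec_recommend_drinks recommend_drinks recommend_drinks_alt
  rw [foldl_filter_eq_filter_all, pvCollect_eq]
  set l := (data.filter (fun d => preferences.all (fun p => pvDGet? d p.1 == some p.2))).map
      (fun d => (pvDGet? d "name").getD "") with hl
  cases hc : l with
  | nil =>
    have : data.filter (fun d => preferences.all (fun p => pvDGet? d p.1 == some p.2)) = [] := by
      simpa [hl, List.map_eq_nil_iff] using hc
    simp [this]
  | cons a t =>
    have : data.filter (fun d => preferences.all (fun p => pvDGet? d p.1 == some p.2)) ≠ [] := by
      intro h; rw [hl, h] at hc; simp at hc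
    simp [this, hl, ← hc]
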